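-- pv_equiv track=rewrite | github.com/captainmoha/python_playgrond | python playground/biggestDiffArr.py | biggestDiff4
-- ===== SOURCE A (Python) =====
-- def biggestDiff4(arr):
-- 	max_num = arr[0]
-- 	min_num = arr[0]
--
-- 	for num in arr:
-- 		if num > max_num:
-- 			max_num = num
-- 		elif num < min_num:
-- 			min_num = num
-- 	return max_num - min_num
-- ===== SOURCE B (Python) =====
-- def biggestDiff4(arr):
-- 	s = sorted(arr)
-- 	return s[-1] - s[0]
-- ===== Notes on version B (the rewrite author's own statement) =====
-- stated objective: simpler
-- what changed: Replaces the running max/min scan with sorting the array and subtracting the first element from the last.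
import Mathlib
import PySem

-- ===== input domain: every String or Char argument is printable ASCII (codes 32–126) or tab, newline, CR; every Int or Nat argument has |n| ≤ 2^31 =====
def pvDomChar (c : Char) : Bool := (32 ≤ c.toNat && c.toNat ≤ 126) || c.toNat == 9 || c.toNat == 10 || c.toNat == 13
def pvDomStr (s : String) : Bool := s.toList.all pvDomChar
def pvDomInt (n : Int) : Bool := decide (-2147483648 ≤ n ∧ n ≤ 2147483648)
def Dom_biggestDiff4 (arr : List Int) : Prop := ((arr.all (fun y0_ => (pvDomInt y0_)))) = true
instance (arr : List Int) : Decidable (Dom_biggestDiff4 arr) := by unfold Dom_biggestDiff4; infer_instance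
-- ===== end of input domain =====

-- B sorts the array and subtracts the first element from the last, instead of A's
-- running max/min scan; equivalence of the RETURN value is proved for nonempty input.

-- ===== PORT A =====
-- A's loop body (the if/elif update of (max_num, min_num)), named so the lemmas can cite it.
def pvStep (p : Int × Int) (num : Int) : Int × Int :=
  if num > p.1 then (num, p.2) else if num < p.2 then (p.1, num) else p

-- arr[0] raises IndexError on the empty list; excluded by Pre_, so the default 0 is unreachable.
def biggestDiff4 (arr : List Int) : Int :=
  let max_num := PySem.List.pyGetD arr 0 0
  let min_num := PySem.List.pyGetD arr 0 0
  let p := arr.foldl pvStep (max_num, min_num)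
  p.1 - p.2

-- ===== PORT B =====
-- s[-1] and s[0] raise IndexError on the empty list; excluded by Pre_, defaults unreachable.
def biggestDiff4_alt (arr : List Int) : Int :=
  let s := PySem.List.sorted arr (fun x => x) false
  PySem.List.pyGetD s (-1) 0 - PySem.List.pyGetD s 0 0

-- ===== PRECONDITION & SPEC =====
-- A indexes arr[0] (and B s[-1], s[0]): both raise IndexError on the empty list.
def Pre_biggestDiff4 (arr : List Int) : Prop := arr ≠ []
instance (arr : List Int) : Decidable (Pre_biggestDiff4 arr) := by unfold Pre_biggestDiff4; infer_instance
def pvWitness_biggestDiff4 : List Int := [3, -1, 4, 1]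

def Spec_biggestDiff4 (arr : List Int) (out : Int) : Prop := out = biggestDiff4_alt arr
instance (arr : List Int) (out : Int) : Decidable (Spec_biggestDiff4 arr out) := by unfold Spec_biggestDiff4; infer_instance

-- ===== CLAIM (what is proved, stated in full; the proofs are below) =====
def Claim_equal_biggestDiff4 : Prop := ∀ (arr : List Int), Dom_biggestDiff4 arr → Pre_biggestDiff4 arr → Spec_biggestDiff4 arr (biggestDiff4 arr)

-- ===== LEMMAS AND PROOFS =====

theorem foldl_step_eq (l : List Int) : ∀ (M m : Int), m ≤ M →
    l.foldl pvStep (M, m) = (l.foldl max M, l.foldl min m) := by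
  induction l with
  | nil => intro M m _; rfl
  | cons x t ih =>
    intro M m hmM
    simp only [List.foldl, pvStep]
    by_cases h1 : x > M
    · simp only [if_pos h1]
      rw [ih x m (by omega)]
      congr 2
      · omega
      · omega
    · simp only [if_neg h1]
      by_cases h2 : x < m
      · simp only [if_pos h2]
        rw [ih M x (by omega)]
        congr 2
        · omega
        · omega
      · simp only [if_neg h2]
        rw [ih M m hmM]
        congr 2
        · omega
        · omega

theorem foldl_max_mem (l : List Int) : ∀ a : Int, l.foldl max a ∈ a :: l := by
  induction l with
  | nil => intro a; simp [List.foldl]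
  | cons x t ih =>
    intro a
    simp only [List.foldl]
    rcases List.mem_cons.mp (ih (max a x)) with h | h
    · rcases max_choice a x with hc | hc <;> (rw [hc] at h ⊢; simp [h])
    · simp [h]

theorem foldl_min_mem (l : List Int) : ∀ a : Int, l.foldl min a ∈ a :: l := by
  induction l with
  | nil => intro a; simp [List.foldl]
  | cons x t ih =>
    intro a
    simp only [List.foldl]
    rcases List.mem_cons.mp (ih (min a x)) with h | h
    · rcases min_choice a x with hc | hc <;> (rw [hc] at h ⊢; simp [h])
    · simp [h]

theorem le_foldl_max (l : List Int) : ∀ (a x : Int), x ∈ a :: l → x ≤ l.foldl max a := by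
  induction l with
  | nil => intro a x hx; simp at hx; simp [List.foldl, hx]
  | cons y t ih =>
    intro a x hx
    simp only [List.foldl]
    rcases List.mem_cons.mp hx with h | h
    · rw [h]; exact le_trans (le_max_left a y) (ih (max a y) _ (List.mem_cons_self))
    · rcases List.mem_cons.mp h with h | h
      · rw [h]; exact le_trans (le_max_right a y) (ih (max a y) _ (List.mem_cons_self))
      · exact ih (max a y) x (List.mem_cons_of_mem _ h)

theorem foldl_min_le (l : List Int) : ∀ (a x : Int), x ∈ a :: l → l.foldl min a ≤ x := by
  induction l with
  | nil => intro a x hx; simp at hx; simp [List.foldl, hx]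
  | cons y t ih =>
    intro a x hx
    simp only [List.foldl]
    rcases List.mem_cons.mp hx with h | h
    · rw [h]; exact le_trans (ih (min a y) _ (List.mem_cons_self)) (min_le_left a y)
    · rcases List.mem_cons.mp h with h | h
      · rw [h]; exact le_trans (ih (min a y) _ (List.mem_cons_self)) (min_le_right a y)
      · exact ih (min a y) x (List.mem_cons_of_mem _ h)

theorem pairwise_le_getLast (l : List Int) (hne : l ≠ [])
    (hp : l.Pairwise (· ≤ ·)) : ∀ x ∈ l, x ≤ l.getLast hne := by
  induction l with
  | nil => exact absurd rfl hne
  | cons y t ih =>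
    intro x hx
    cases t with
    | nil => simp at hx; simp [List.getLast, hx]
    | cons z t' =>
      rw [List.getLast_cons (by simp)]
      rcases List.mem_cons.mp hx with h | h
      · subst h
        have hyz : ∀ w ∈ z :: t', x ≤ w := (List.pairwise_cons.mp hp).1
        exact le_trans (hyz z (List.mem_cons_self))
          (ih (by simp) (List.pairwise_cons.mp hp).2 z (List.mem_cons_self))
      · exact ih (by simp) (List.pairwise_cons.mp hp).2 x h

theorem biggestDiff4_spec : Claim_equal_biggestDiff4 := by
  unfold Claim_equal_biggestDiff4
  intro arr _ hne
  unfold Spec_biggestDiff4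
  obtain ⟨a0, t, rfl⟩ := List.exists_cons_of_ne_nil hne
  have hsne : PySem.List.sorted (a0 :: t) (fun x => x) false ≠ [] := by
    intro h
    exact hne ((PySem.List.sorted_eq_nil_iff _ _ _).mp h)
  have hA : biggestDiff4 (a0 :: t)
      = ((a0 :: t).foldl pvStep (a0, a0)).1 - ((a0 :: t).foldl pvStep (a0, a0)).2 := by
    simp [biggestDiff4, PySem.List.pyGetD_zero]
  have hB : biggestDiff4_alt (a0 :: t)
      = (PySem.List.sorted (a0 :: t) (fun x => x) false).getLast hsne
        - (PySem.List.sorted (a0 :: t) (fun x => x) false).getD 0 0 := by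
    simp [biggestDiff4_alt, PySem.List.pyGetD_neg_one _ _ hsne, PySem.List.pyGetD_zero]
  rw [hA, hB]
  set s := PySem.List.sorted (a0 :: t) (fun x => x) false with hs
  have hperm : s.Perm (a0 :: t) := PySem.List.sorted_perm _ _ _
  have hpw : s.Pairwise (· ≤ ·) := by
    have := PySem.List.sorted_pairwise (a0 :: t) (fun x => x)
    simpa using this
  rw [foldl_step_eq (a0 :: t) a0 a0 le_rfl]
  obtain ⟨h0, ts, hcons⟩ := List.exists_cons_of_ne_nil hsne
  have hhead : s.getD 0 0 = h0 := by rw [hcons]; rfl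
  have hlast_mem : s.getLast hsne ∈ s := List.getLast_mem hsne
  have hmem_iff : ∀ x : Int, x ∈ s ↔ x ∈ a0 :: t := fun x => hperm.mem_iff
  have hh0_le : ∀ y ∈ (a0 :: t), h0 ≤ y := by
    intro y hy
    have := PySem.List.key_head_sorted_le (a0 :: t) (fun x => x) (m := h0) (t := ts)
      (by rw [← hs]; exact hcons) y hy
    simpa using this
  have hlast_ge : ∀ x ∈ s, x ≤ s.getLast hsne := pairwise_le_getLast s hsne hpw
  have hM_mem : (a0 :: t).foldl max a0 ∈ a0 :: t := by
    rcases List.mem_cons.mp (foldl_max_mem (a0 :: t) a0) with h | h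
    · rw [h]; exact List.mem_cons_self
    · exact h
  have hmax_eq : (a0 :: t).foldl max a0 = s.getLast hsne := by
    apply le_antisymm
    · exact hlast_ge _ ((hmem_iff _).mpr hM_mem)
    · exact le_foldl_max (a0 :: t) a0 _ (List.mem_cons_of_mem _ ((hmem_iff _).mp hlast_mem))
  have hm_mem : (a0 :: t).foldl min a0 ∈ a0 :: t := by
    rcases List.mem_cons.mp (foldl_min_mem (a0 :: t) a0) with h | h
    · rw [h]; exact List.mem_cons_self
    · exact h
  have hmin_eq : (a0 :: t).foldl min a0 = s.getD 0 0 := by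
    rw [hhead]
    apply le_antisymm
    · exact foldl_min_le (a0 :: t) a0 h0
        (List.mem_cons_of_mem _ ((hmem_iff h0).mp (hcons ▸ List.mem_cons_self)))
    · exact hh0_le _ hm_mem
  rw [hmax_eq, hmin_eq]
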